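-- pv_equiv track=rewrite | github.com/mujin/mujinwebstackclientpy | devbin/mujin_webstackclientpy_generategraphclient.py | _CleanDocstring
-- ===== SOURCE A (Python) =====
-- def _CleanDocstring(docstring):
--     """Clean up docstring formatting to match ruff standards."""
--     if not docstring:
--         return docstring
--     # split into lines and strip trailing whitespace
--     lines = [line.rstrip() for line in docstring.split('\n')]
--     # remove leading empty lines
--     while lines and not lines[0]:
--         lines.pop(0)
--     # remove trailing empty lines
--     while lines and not lines[-1]:
--         lines.pop()
--     # collapse multiple consecutive empty lines into single empty lines
--     resultLines = []
--     isPreviousEmpty = False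
--     for line in lines:
--         if line:
--             resultLines.append(line)
--             isPreviousEmpty = False
--         elif not isPreviousEmpty:
--             resultLines.append('')
--             isPreviousEmpty = True
--     return '\n'.join(resultLines)
-- ===== SOURCE B (Python) =====
-- def _CleanDocstring(docstring):
--     """Clean up docstring formatting to match ruff standards."""
--     if not docstring:
--         return docstring
--     # group non-empty (rstripped) lines into paragraphs; empty lines are separators
--     paragraphs = []
--     current = []
--     for line in docstring.split('\n'):
--         line = line.rstrip()
--         if line:
--             current.append(line)
--         elif current:
--             paragraphs.append(current)
--             current = []
--     if current:
--         paragraphs.append(current)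
--     return '\n\n'.join('\n'.join(p) for p in paragraphs)
-- ===== Notes on version B (the rewrite author's own statement) =====
-- stated objective: idiomatic
-- what changed: B groups non-empty rstripped lines into paragraphs in one pass and joins the paragraphs with a blank separator line, replacing A's three phases (leading-trim, trailing-trim, collapse loop with an isPreviousEmpty flag).
import Mathlib
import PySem

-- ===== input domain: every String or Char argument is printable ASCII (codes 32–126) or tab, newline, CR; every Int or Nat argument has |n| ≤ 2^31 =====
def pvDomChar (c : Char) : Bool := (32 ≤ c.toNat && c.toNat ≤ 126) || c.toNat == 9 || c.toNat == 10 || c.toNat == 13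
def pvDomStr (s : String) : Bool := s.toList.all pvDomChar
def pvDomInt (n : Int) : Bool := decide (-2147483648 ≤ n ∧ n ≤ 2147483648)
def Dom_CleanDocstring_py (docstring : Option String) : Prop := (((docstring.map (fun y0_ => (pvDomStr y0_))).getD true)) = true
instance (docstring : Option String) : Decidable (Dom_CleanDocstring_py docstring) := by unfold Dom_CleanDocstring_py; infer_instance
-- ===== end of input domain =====

-- B normalizes the docstring by grouping non-empty rstripped lines into paragraphs and joining
-- them with blank separators, instead of A's trim-then-collapse state machine (objective: idiomatic).

-- ===== PORT A =====
-- A-side helper: the body of A's collapse loop (state: resultLines, isPreviousEmpty)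
def pvStepA (acc : List String × Bool) (line : String) : List String × Bool :=
  if line ≠ "" then (acc.1 ++ [line], false)
  else if acc.2 = false then (acc.1 ++ [""], true)
  else acc

def CleanDocstring_py (docstring : Option String) : Option String :=
  match docstring with
  | none => none
  | some s =>
    if s = "" then some s
    else
      -- lines = [line.rstrip() for line in docstring.split('\n')]
      let lines := ((PySem.Str.split? s "\n").getD []).map PySem.Str.rstrip
      -- while lines and not lines[0]: lines.pop(0)
      let lines1 := lines.dropWhile (fun l => l = "")
      -- while lines and not lines[-1]: lines.pop()
      let lines2 := (lines1.reverse.dropWhile (fun l => l = "")).reverse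
      -- collapse loop with isPreviousEmpty flag
      let r := lines2.foldl pvStepA ([], false)
      some (PySem.Str.join "\n" r.1)

-- ===== PORT B =====
-- B-side helper: the body of B's grouping loop (state: paragraphs, current) on an rstripped line
def pvStepB (acc : List (List String) × List String) (line : String) :
    List (List String) × List String :=
  if line ≠ "" then (acc.1, acc.2 ++ [line])
  else if acc.2 ≠ [] then (acc.1 ++ [acc.2], [])
  else acc

def CleanDocstring_py_alt (docstring : Option String) : Option String :=
  match docstring with
  | none => none
  | some s =>
    if s = "" then some s
    else
      let r := ((PySem.Str.split? s "\n").getD []).foldl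
        (fun acc rawLine => pvStepB acc (PySem.Str.rstrip rawLine)) ([], [])
      let paragraphs := if r.2 ≠ [] then r.1 ++ [r.2] else r.1
      some (PySem.Str.join "\n\n" (paragraphs.map (PySem.Str.join "\n")))

-- ===== PRECONDITION & SPEC =====
def Spec_CleanDocstring_py (docstring : Option String) (out : Option String) : Prop := out = CleanDocstring_py_alt docstring
instance (docstring : Option String) (out : Option String) : Decidable (Spec_CleanDocstring_py docstring out) := by unfold Spec_CleanDocstring_py; infer_instance

-- ===== CLAIM (what is proved, stated in full; the proofs are below) =====
def Claim_equal_CleanDocstring_py : Prop := ∀ (docstring : Option String), Dom_CleanDocstring_py docstring → Spec_CleanDocstring_py docstring (CleanDocstring_py docstring)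

-- ===== LEMMAS AND PROOFS =====

-- paragraphs flattened into a single line list, a separator element e between paragraphs
def pvFlat {α : Type} (e : α) : List (List α) → List α
  | [] => []
  | [p] => p
  | p :: q :: ps => p ++ e :: pvFlat e (q :: ps)

-- B's finalization: flush the open paragraph
def pvFinl (sb : List (List String) × List String) : List (List String) :=
  if sb.2 ≠ [] then sb.1 ++ [sb.2] else sb.1

-- the invariant tying A's fold state to B's fold state
def pvInv (sa : List String × Bool) (sb : List (List String) × List String) : Prop :=
  (∀ p ∈ sb.1, p ≠ []) ∧
  ((sb.2 = [] ∧ sa.2 = true ∧ sb.1 ≠ [] ∧ sa.1 = pvFlat "" sb.1 ++ [""]) ∨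
   (sb.2 ≠ [] ∧ sa.2 = false ∧ sa.1 = pvFlat "" (sb.1 ++ [sb.2])))

theorem pvFlat_cons {α : Type} (e : α) (p : List α) (l : List (List α)) (h : l ≠ []) :
    pvFlat e (p :: l) = p ++ e :: pvFlat e l := by
  cases l with
  | nil => exact absurd rfl h
  | cons q l => simp [pvFlat]

theorem pvFlat_snoc {α : Type} (e : α) (ps : List (List α)) (q : List α) (h : ps ≠ []) :
    pvFlat e (ps ++ [q]) = pvFlat e ps ++ e :: q := by
  induction ps with
  | nil => exact absurd rfl h
  | cons p ps ih =>
    rw [List.cons_append, pvFlat_cons e p (ps ++ [q]) (by simp)]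
    cases ps with
    | nil => simp [pvFlat]
    | cons p2 ps2 =>
      rw [ih (by simp), pvFlat_cons e p (p2 :: ps2) (by simp)]
      simp

theorem pvFlat_snoc_append {α : Type} (e : α) (ps : List (List α)) (q : List α) (x : α) :
    pvFlat e (ps ++ [q ++ [x]]) = pvFlat e (ps ++ [q]) ++ [x] := by
  induction ps with
  | nil => simp [pvFlat]
  | cons p ps ih =>
    rw [List.cons_append, List.cons_append, pvFlat_cons e p (ps ++ [q ++ [x]]) (by simp),
      pvFlat_cons e p (ps ++ [q]) (by simp), ih]
    simp

theorem pvFlat_map (pss : List (List String)) :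
    (pvFlat "" pss).map String.toList = pvFlat [] (pss.map (List.map String.toList)) := by
  induction pss with
  | nil => simp [pvFlat]
  | cons p ps ih =>
    cases ps with
    | nil => simp [pvFlat]
    | cons q r =>
      simp only [pvFlat, List.map_append, List.map_cons, ih]
      simp

theorem pvFlat_ne_nil (pss : List (List (List Char))) (h : pss ≠ [])
    (hne : ∀ p ∈ pss, p ≠ []) : pvFlat [] pss ≠ [] := by
  cases pss with
  | nil => exact absurd rfl h
  | cons p ps =>
    cases ps with
    | nil => exact hne p (by simp)
    | cons q r => simp [pvFlat]

theorem pvInv_step (sa : List String × Bool) (sb : List (List String) × List String)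
    (l : String) (h : pvInv sa sb) : pvInv (pvStepA sa l) (pvStepB sb l) := by
  obtain ⟨h1, h2⟩ := h
  by_cases hl : l = ""
  · subst hl
    rcases h2 with ⟨hc, hp, hn, hr⟩ | ⟨hc, hp, hr⟩
    · rw [show pvStepA sa "" = sa from by simp [pvStepA, hp],
        show pvStepB sb "" = sb from by simp [pvStepB, hc]]
      exact ⟨h1, Or.inl ⟨hc, hp, hn, hr⟩⟩
    · rw [show pvStepA sa "" = (sa.1 ++ [""], true) from by simp [pvStepA, hp],
        show pvStepB sb "" = (sb.1 ++ [sb.2], []) from by simp [pvStepB, hc]]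
      refine ⟨?_, Or.inl ⟨rfl, rfl, by simp, by simp [hr]⟩⟩
      intro p hp2
      rcases List.mem_append.1 hp2 with h | h
      · exact h1 p h
      · simp at h; subst h; exact hc
  · rw [show pvStepA sa l = (sa.1 ++ [l], false) from by simp [pvStepA, hl],
      show pvStepB sb l = (sb.1, sb.2 ++ [l]) from by simp [pvStepB, hl]]
    rcases h2 with ⟨hc, hp, hn, hr⟩ | ⟨hc, hp, hr⟩
    · refine ⟨h1, Or.inr ⟨by simp, rfl, ?_⟩⟩
      rw [hc, hr, List.nil_append, pvFlat_snoc "" sb.1 [l] hn]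
      simp
    · refine ⟨h1, Or.inr ⟨by simp, rfl, ?_⟩⟩
      rw [hr, ← pvFlat_snoc_append]

theorem pvInv_fold (t : List String) (sa : List String × Bool)
    (sb : List (List String) × List String) (h : pvInv sa sb) :
    pvInv (t.foldl pvStepA sa) (t.foldl pvStepB sb) := by
  induction t generalizing sa sb with
  | nil => exact h
  | cons l t ih => exact ih _ _ (pvInv_step sa sb l h)

-- leading empty lines are no-ops for B from the initial state
theorem pvFoldB_leading (es r : List String) (he : ∀ l ∈ es, l = "") :
    (es ++ r).foldl pvStepB ([], []) = r.foldl pvStepB ([], []) := by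
  induction es with
  | nil => rfl
  | cons l es ih =>
    have hl : l = "" := he l (by simp)
    subst hl
    rw [List.cons_append, List.foldl_cons, show pvStepB ([], []) "" = ([], []) from by
      simp [pvStepB]]
    exact ih (fun x hx => he x (by simp [hx]))

-- trailing empty lines do not change the finalized paragraph list
theorem pvFinl_fold_empties (es : List String) (sb : List (List String) × List String)
    (he : ∀ l ∈ es, l = "") : pvFinl (es.foldl pvStepB sb) = pvFinl sb := by
  induction es generalizing sb with
  | nil => rfl
  | cons l es ih =>
    have hl : l = "" := he l (by simp)
    subst hl
    rw [List.foldl_cons, ih _ (fun x hx => he x (by simp [hx]))]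
    by_cases hc : sb.2 = [] <;> simp [pvStepB, pvFinl, hc]

-- a fold over a list ending in a non-empty line leaves an open paragraph
theorem pvCur_ne_of_last (u : List String) (x : String) (hx : x ≠ "")
    (sb : List (List String) × List String) :
    ((u ++ [x]).foldl pvStepB sb).2 ≠ [] := by
  rw [List.foldl_append]
  simp [pvStepB, hx]

theorem pvJoin_append (sep : List Char) (p rest : List (List Char)) (hp : p ≠ [])
    (hr : rest ≠ []) :
    PySem.Chars.join sep (p ++ rest) =
      PySem.Chars.join sep p ++ sep ++ PySem.Chars.join sep rest := by
  induction p with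
  | nil => exact absurd rfl hp
  | cons a p ih =>
    cases p with
    | nil =>
      cases rest with
      | nil => exact absurd rfl hr
      | cons r rs => simp [PySem.Chars.join_cons_cons, PySem.Chars.join_singleton]
    | cons b p2 =>
      rw [List.cons_append, List.cons_append, PySem.Chars.join_cons_cons,
        ← List.cons_append, ih (by simp), PySem.Chars.join_cons_cons]
      simp

theorem pvJoinC (pss : List (List (List Char))) (hne : ∀ p ∈ pss, p ≠ []) :
    PySem.Chars.join ['\n'] (pvFlat [] pss) =
      PySem.Chars.join ['\n', '\n'] (pss.map (PySem.Chars.join ['\n'])) := by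
  induction pss with
  | nil => simp [pvFlat, PySem.Chars.join_nil]
  | cons p ps ih =>
    cases ps with
    | nil => simp [pvFlat, PySem.Chars.join_singleton]
    | cons q r =>
      have hf : pvFlat ([] : List Char) (q :: r) ≠ [] :=
        pvFlat_ne_nil _ (by simp) (fun x hx => hne x (by simp [hx]))
      obtain ⟨f, fs, hffs⟩ := List.exists_cons_of_ne_nil hf
      rw [show pvFlat ([] : List Char) (p :: q :: r) = p ++ [] :: pvFlat [] (q :: r) from rfl,
        pvJoin_append ['\n'] p ([] :: pvFlat [] (q :: r)) (hne p (by simp)) (by simp),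
        hffs, PySem.Chars.join_cons_cons, ← hffs,
        ih (fun x hx => hne x (by simp [hx])), List.map_cons, List.map_cons, List.map_cons,
        PySem.Chars.join_cons_cons]
      simp

theorem pvJoinS (pss : List (List String)) (hne : ∀ p ∈ pss, p ≠ []) :
    PySem.Str.join "\n" (pvFlat "" pss) =
      PySem.Str.join "\n\n" (pss.map (PySem.Str.join "\n")) := by
  apply String.toList_inj.mp
  rw [PySem.Str.toList_join, PySem.Str.toList_join, pvFlat_map, List.map_map]
  have h1 : "\n".toList = ['\n'] := by decide
  have h2 : "\n\n".toList = ['\n', '\n'] := by decide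
  have h3 : (String.toList ∘ PySem.Str.join "\n") =
      fun p => PySem.Chars.join ['\n'] (p.map String.toList) := by
    funext p; simp [PySem.Str.toList_join, h1]
  rw [h1, h2, h3,
    pvJoinC _ (by intro x hx; obtain ⟨p, hp, rfl⟩ := List.mem_map.1 hx; simpa using hne p hp)]
  simp [List.map_map]
  rfl

-- B's raw loop (rstrip inside) is pvStepB over the rstripped lines
theorem pvFoldB_map (l : List String) (acc : List (List String) × List String) :
    l.foldl (fun acc rawLine => pvStepB acc (PySem.Str.rstrip rawLine)) acc =
      (l.map PySem.Str.rstrip).foldl pvStepB acc := by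
  induction l generalizing acc with
  | nil => rfl
  | cons x l ih => simp only [List.foldl_cons, List.map_cons, ih]

-- ===== VERDICT (by name: the statement is the Claim_ definition above) =====
theorem CleanDocstring_py_spec : Claim_equal_CleanDocstring_py := by
  intro docstring _
  unfold Spec_CleanDocstring_py
  match docstring with
  | none => rfl
  | some s =>
    by_cases hs : s = ""
    · simp [CleanDocstring_py, CleanDocstring_py_alt, hs]
    · rw [show CleanDocstring_py (some s) = some (PySem.Str.join "\n"
            ((((((PySem.Str.split? s "\n").getD []).map PySem.Str.rstrip).dropWhile
              (fun l => l = "")).reverse.dropWhile (fun l => l = "")).reverse.foldl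
              pvStepA ([], false)).1) from by
          simp only [CleanDocstring_py, if_neg hs],
        show CleanDocstring_py_alt (some s) = some (PySem.Str.join "\n\n"
            ((pvFinl (((PySem.Str.split? s "\n").getD []).foldl
              (fun acc rawLine => pvStepB acc (PySem.Str.rstrip rawLine)) ([], []))).map
              (PySem.Str.join "\n"))) from by
          simp only [CleanDocstring_py_alt, pvFinl, if_neg hs]]
      rw [pvFoldB_map]
      set q : String → Bool := fun l => decide (l = "") with hq
      set ms := ((PySem.Str.split? s "\n").getD []).map PySem.Str.rstrip with hms
      set ls := ms.dropWhile q with hls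
      set rev := ls.reverse.dropWhile q with hrev
      set t := rev.reverse with htdef
      have hsplit1 : ms = ms.takeWhile q ++ ls := (List.takeWhile_append_dropWhile).symm
      have hsplit2 : ls = t ++ (ls.reverse.takeWhile q).reverse := by
        conv_lhs => rw [← List.reverse_reverse ls,
          ← List.takeWhile_append_dropWhile (p := q) (l := ls.reverse)]
        rw [List.reverse_append]
      have hB1 : ms.foldl pvStepB ([], []) = ls.foldl pvStepB ([], []) := by
        conv_lhs => rw [hsplit1]
        exact pvFoldB_leading _ _ (fun x hx => by
          simpa [hq] using List.mem_takeWhile_imp hx)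
      have hB2 : pvFinl (ls.foldl pvStepB ([], [])) = pvFinl (t.foldl pvStepB ([], [])) := by
        conv_lhs => rw [hsplit2]
        rw [List.foldl_append]
        exact pvFinl_fold_empties _ _ (fun x hx => by
          simpa [hq] using List.mem_takeWhile_imp (List.mem_reverse.mp hx))
      rw [hB1, hB2]
      have hqhead : ∀ (L : List String) (x : String) (xs : List String),
          L.dropWhile q = x :: xs → x ≠ "" := by
        intro L
        induction L with
        | nil => intro x xs hLx; simp at hLx
        | cons a L ih =>
          intro x xs hLx
          by_cases ha : q a
          · rw [List.dropWhile_cons_of_pos ha] at hLx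
            exact ih x xs hLx
          · rw [List.dropWhile_cons_of_neg ha] at hLx
            cases hLx
            simpa [hq] using ha
      cases ht : t with
      | nil => rfl
      | cons l r =>
        have hrevne : rev ≠ [] := by
          intro h0
          rw [htdef, h0] at ht
          exact absurd ht.symm (by simp)
        obtain ⟨x, xs, hxxs⟩ := List.exists_cons_of_ne_nil hrevne
        have hx : x ≠ "" := hqhead ls.reverse x xs (by rw [← hrev]; exact hxxs)
        have htux : t = xs.reverse ++ [x] := by rw [htdef, hxxs]; simp
        have hl : l ≠ "" := by
          refine hqhead ms l (r ++ (ls.reverse.takeWhile q).reverse) ?_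
          rw [← hls]
          conv_lhs => rw [hsplit2, ht]
          simp
        simp only [List.foldl_cons]
        rw [show pvStepA ([], false) l = ([l], false) from by simp [pvStepA, hl],
          show pvStepB ([], []) l = ([], [l]) from by simp [pvStepB, hl]]
        have hinv := pvInv_fold r ([l], false) ([], [l])
          ⟨by simp, Or.inr ⟨by simp, rfl, by simp [pvFlat]⟩⟩
        have hcur : (r.foldl pvStepB ([], [l])).2 ≠ [] := by
          have h5 : (t.foldl pvStepB ([], [])).2 ≠ [] := by
            rw [htux]; exact pvCur_ne_of_last _ _ hx _
          rw [ht] at h5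
          simp only [List.foldl_cons] at h5
          rwa [show pvStepB ([], []) l = ([], [l]) from by simp [pvStepB, hl]] at h5
        rcases hinv with ⟨h1, h2 | h2⟩
        · exact absurd h2.1 hcur
        · obtain ⟨-, -, hfa⟩ := h2
          rw [show pvFinl (r.foldl pvStepB ([], [l])) =
              (r.foldl pvStepB ([], [l])).1 ++ [(r.foldl pvStepB ([], [l])).2] from by
            simp [pvFinl, hcur]]
          congr 1
          rw [hfa]
          refine pvJoinS _ ?_
          intro p hp
          rcases List.mem_append.1 hp with h | h
          · exact h1 p h
          · simp at h; subst h; exact hcur
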